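-- pv_equiv track=rewrite | github.com/SmoKerYM/AI_Powered_Experience_Matcher | app.py | render_skill_overlap
-- ===== SOURCE A (Python) =====
-- def render_skill_overlap(exp_skills: list, jd_skills: set) -> str:
--     """Render matched (green) and missing (red) JD skills only."""
--     exp_skills_lower = {s.lower() for s in exp_skills}
--     matched = jd_skills & exp_skills_lower
--     missing = jd_skills - exp_skills_lower
--
--     html_parts = []
--     for skill in sorted(matched):
--         html_parts.append(f'<span class="skill-match">{skill}</span>')
--     for skill in sorted(missing):
--         html_parts.append(f'<span class="skill-miss">{skill}</span>')
--
--     return " ".join(html_parts)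
-- ===== SOURCE B (Python) =====
-- def render_skill_overlap(exp_skills: list, jd_skills: set) -> str:
--     """Render matched (green) and missing (red) JD skills only."""
--     exp_skills_lower = {s.lower() for s in exp_skills}
--     ordered = sorted(jd_skills, key=lambda s: (s not in exp_skills_lower, s))
--     html_parts = [
--         f'<span class="skill-{"match" if s in exp_skills_lower else "miss"}">{s}</span>'
--         for s in ordered
--     ]
--     return " ".join(html_parts)
-- ===== Notes on version B (the rewrite author's own statement) =====
-- stated objective: alternative
-- what changed: Drops the set intersection/difference and the two separate sorts entirely: B performs a single sort of the JD skills under the composite key (not-matched, skill), so the matched-before-missing order falls out of the sort key, and one comprehension renders each span with the class chosen inline.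
import Mathlib
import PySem

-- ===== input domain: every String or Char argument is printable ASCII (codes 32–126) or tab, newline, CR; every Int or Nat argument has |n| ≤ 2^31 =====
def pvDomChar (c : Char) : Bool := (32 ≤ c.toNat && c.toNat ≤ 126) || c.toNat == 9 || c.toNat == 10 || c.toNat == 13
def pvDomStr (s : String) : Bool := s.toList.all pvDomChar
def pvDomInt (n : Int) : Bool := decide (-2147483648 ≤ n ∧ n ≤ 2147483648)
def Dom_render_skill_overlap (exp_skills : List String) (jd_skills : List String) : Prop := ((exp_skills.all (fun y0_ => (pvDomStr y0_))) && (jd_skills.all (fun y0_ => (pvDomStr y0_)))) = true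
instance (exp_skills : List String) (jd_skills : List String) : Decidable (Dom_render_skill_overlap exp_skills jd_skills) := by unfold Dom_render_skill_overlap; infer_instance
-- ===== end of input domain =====

-- B replaces A's set intersection/difference plus two sorts by ONE sort under the
-- composite key (not-matched, skill) and one pass rendering each span ('alternative').

-- ===== PORT A =====
def render_skill_overlap (exp_skills : List String) (jd_skills : List String) : String :=
  -- exp_skills_lower = {s.lower() for s in exp_skills}
  let exp_skills_lower : PySem.Set String := PySem.Set.ofList (exp_skills.map PySem.Str.lower)
  -- jd_skills is a Python set
  let jd : PySem.Set String := PySem.Set.ofList jd_skills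
  let matched : PySem.Set String := PySem.Set.inter jd exp_skills_lower
  let missing : PySem.Set String := PySem.Set.diff jd exp_skills_lower
  let html_parts : List String :=
    (PySem.List.sorted matched (fun s => s) false).foldl
      (fun acc skill => acc ++ ["<span class=\"skill-match\">" ++ skill ++ "</span>"]) []
  let html_parts :=
    (PySem.List.sorted missing (fun s => s) false).foldl
      (fun acc skill => acc ++ ["<span class=\"skill-miss\">" ++ skill ++ "</span>"]) html_parts
  PySem.Str.join " " html_parts

-- ===== PORT B =====
def render_skill_overlap_alt (exp_skills : List String) (jd_skills : List String) : String :=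
  let exp_skills_lower : PySem.Set String := PySem.Set.ofList (exp_skills.map PySem.Str.lower)
  -- sorted(jd_skills, key=lambda s: (s not in exp_skills_lower, s))
  let ordered : List String :=
    PySem.List.sorted2 (PySem.Set.ofList jd_skills)
      (fun s => !PySem.Set.contains exp_skills_lower s) (fun s => s) false
  let html_parts : List String :=
    ordered.map (fun s =>
      "<span class=\"skill-" ++
        (if PySem.Set.contains exp_skills_lower s then "match" else "miss") ++
        "\">" ++ s ++ "</span>")
  PySem.Str.join " " html_parts

-- ===== PRECONDITION & SPEC =====
def Spec_render_skill_overlap (exp_skills : List String) (jd_skills : List String) (out : String) : Prop := out = render_skill_overlap_alt exp_skills jd_skills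
instance (exp_skills : List String) (jd_skills : List String) (out : String) : Decidable (Spec_render_skill_overlap exp_skills jd_skills out) := by unfold Spec_render_skill_overlap; infer_instance

-- ===== CLAIM (what is proved, stated in full; the proofs are below) =====
def Claim_equal_render_skill_overlap : Prop := ∀ (exp_skills : List String) (jd_skills : List String), Dom_render_skill_overlap exp_skills jd_skills → Spec_render_skill_overlap exp_skills jd_skills (render_skill_overlap exp_skills jd_skills)

-- ===== LEMMAS AND PROOFS =====

-- B's tuple-key sort IS a single-key sort under the lexicographic order on Bool × α.
theorem pv_sorted2_eq_sorted_lex {α : Type} [LinearOrder α] (xs : List α) (k1 : α → Bool) :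
    PySem.List.sorted2 xs k1 (fun s => s) false
      = PySem.List.sorted xs (fun a => toLex (k1 a, a)) false := by
  have hbe : (fun a b : α => decide (k1 a < k1 b) || (!decide (k1 b < k1 a) && decide (a < b)))
      = (fun a b : α => decide (toLex (k1 a, a) < toLex (k1 b, b))) := by
    funext a b
    rcases hk1 : k1 a <;> rcases hk2 : k1 b <;>
      simp [Prod.Lex.lt_iff]
  rw [PySem.List.sorted_eq_foldl_insertBy]
  unfold PySem.List.sorted2
  simp only [if_neg (by decide : ¬ (false = true)), hbe]

-- sorting a filtered nodup list = filtering the sorted list (strictly increasing order)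
theorem pv_sorted_filter (xs : List String) (p : String → Bool) :
    PySem.List.sorted ((PySem.Set.ofList xs).filter p) (fun s => s) false
      = (PySem.List.sorted (PySem.Set.ofList xs) (fun s => s) false).filter p := by
  apply PySem.List.sorted_eq_of_perm_of_pairwise_lt
  · exact ((PySem.List.sorted_perm (PySem.Set.ofList xs) (fun s => s) false).filter p)
  · exact (PySem.List.sorted_ofList_pairwise_lt xs).filter p

-- the lex-key sort of set(jd) is: sorted matched elements first, sorted missing after
theorem pv_sorted_lex_split (jd : List String) (p : String → Bool) :
    PySem.List.sorted (PySem.Set.ofList jd) (fun a => toLex ((!p a), a)) false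
      = (PySem.List.sorted (PySem.Set.ofList jd) (fun s => s) false).filter p
        ++ (PySem.List.sorted (PySem.Set.ofList jd) (fun s => s) false).filter (fun s => !p s) := by
  set S := PySem.List.sorted (PySem.Set.ofList jd) (fun s => s) false with hS
  have hperm : (S.filter p ++ S.filter (fun s => !p s)).Perm (PySem.Set.ofList jd) :=
    (List.filter_append_perm p S).trans (PySem.List.sorted_perm _ _ _)
  have hpair : List.Pairwise (fun x y : String => x < y) S :=
    PySem.List.sorted_ofList_pairwise_lt jd
  apply PySem.List.sorted_eq_of_perm_of_pairwise_lt _ _ _ hperm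
  rw [List.pairwise_append]
  refine ⟨?_, ?_, ?_⟩
  · refine (hpair.filter p).imp_of_mem ?_
    intro a b ha hb hlt
    have hpa : p a = true := (List.mem_filter.mp ha).2
    have hpb : p b = true := (List.mem_filter.mp hb).2
    simp [Prod.Lex.lt_iff, hpa, hpb, hlt]
  · refine (hpair.filter _).imp_of_mem ?_
    intro a b ha hb hlt
    have hpa : p a = false := by simpa using (List.mem_filter.mp ha).2
    have hpb : p b = false := by simpa using (List.mem_filter.mp hb).2
    simp [Prod.Lex.lt_iff, hpa, hpb, hlt]
  · intro a ha b hb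
    have hpa : p a = true := (List.mem_filter.mp ha).2
    have hpb : p b = false := by simpa using (List.mem_filter.mp hb).2
    simp [Prod.Lex.lt_iff, hpa, hpb]

theorem render_skill_overlap_eq (exp_skills : List String) (jd_skills : List String) :
    render_skill_overlap exp_skills jd_skills = render_skill_overlap_alt exp_skills jd_skills := by
  unfold render_skill_overlap render_skill_overlap_alt
  have hi : ∀ (s t : PySem.Set String), PySem.Set.inter s t = s.filter (fun x => PySem.Set.contains t x) := fun _ _ => rfl
  have hd : ∀ (s t : PySem.Set String), PySem.Set.diff s t = s.filter (fun x => !PySem.Set.contains t x) := fun _ _ => rfl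
  simp only [hi, hd, pv_sorted_filter, pv_sorted2_eq_sorted_lex, pv_sorted_lex_split,
    PySem.List.foldl_append_singleton_eq_map, List.nil_append, List.map_append]
  apply congrArg
  congr 1
  · apply List.map_congr_left
    intro s hs
    have hps : PySem.Set.contains (PySem.Set.ofList (exp_skills.map PySem.Str.lower)) s = true :=
      (List.mem_filter.mp hs).2
    rw [if_pos hps]
    rfl
  · apply List.map_congr_left
    intro s hs
    have hps : PySem.Set.contains (PySem.Set.ofList (exp_skills.map PySem.Str.lower)) s = false := by
      simpa using (List.mem_filter.mp hs).2
    rw [if_neg (by rw [hps]; exact Bool.false_ne_true)]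
    rfl

-- ===== VERDICT (by name: the statement is the Claim_ definition above) =====
theorem render_skill_overlap_spec : Claim_equal_render_skill_overlap := by
  intro exp_skills jd_skills _
  exact render_skill_overlap_eq exp_skills jd_skills
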